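-- pv_equiv track=rewrite | github.com/JaehoonShin2/coding-test | soltlux/1차/3.py | solution
-- ===== SOURCE A (Python) =====
-- def ascii(list):
--     ord_list = []
--     for l in list:
--         ord_list.append(ord(l))
--     return ord_list
--
-- def de_ascii(list):
--     de_ascii_list = []
--     for i in list:
--         de_ascii_list.append(chr(i))
--     return de_ascii_list
--
-- def solution(encrypted_text, key, rotation):
--
--     ord_en = ascii(encrypted_text)
--
--     if rotation < 0:
--         for _ in range(abs(rotation)):
--             a = ord_en.pop()
--             ord_en.insert(0, a)
--     else:
--         for _ in range(rotation):
--             a = ord_en.pop(0)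
--             ord_en.append(a)
--
--     ord_key = ascii(key)
--     kk = [x-96 for x in ord_key]
--     en = [ x-y for x, y in zip(ord_en, kk)]
--     en = [ x if x > 96 else x+123-97 for x in en ]
--
--     return ''.join(de_ascii(en))
-- ===== SOURCE B (Python) =====
-- def solution(encrypted_text, key, rotation):
--     n = len(encrypted_text)
--     out = []
--     for i in range(min(n, len(key))):
--         src = ord(encrypted_text[(i + rotation) % n]) - (ord(key[i]) - 96)
--         if src <= 96:
--             src += 26
--         out.append(chr(src))
--     return ''.join(out)
-- ===== Notes on version B (the rewrite author's own statement) =====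
-- stated objective: faster
-- what changed: Replaces the |rotation|-step pop/insert physical rotation and the three list-comprehension passes by one direct pass that indexes the original string at (i+rotation) mod n, so no rotated list or intermediate ord lists are materialized.
import Mathlib
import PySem

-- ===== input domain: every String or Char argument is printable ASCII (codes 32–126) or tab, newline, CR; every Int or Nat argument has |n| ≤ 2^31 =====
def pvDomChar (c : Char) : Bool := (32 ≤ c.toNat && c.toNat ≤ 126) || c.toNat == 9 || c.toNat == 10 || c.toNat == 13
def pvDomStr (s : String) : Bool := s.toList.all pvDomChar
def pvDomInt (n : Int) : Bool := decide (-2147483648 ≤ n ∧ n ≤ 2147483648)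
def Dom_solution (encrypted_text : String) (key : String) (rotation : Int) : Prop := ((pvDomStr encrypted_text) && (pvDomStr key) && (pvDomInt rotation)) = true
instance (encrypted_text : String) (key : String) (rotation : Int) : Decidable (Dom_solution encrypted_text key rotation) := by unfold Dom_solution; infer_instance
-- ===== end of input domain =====

-- B eliminates the |rotation|-step physical rotation and the intermediate ord lists:
-- one pass indexes the original string at (i+rotation) mod n (objective: faster).

-- ===== PORT A =====
-- ascii helper: loop appending ord of each char
def asciiA (l : List Char) : List Int := l.foldl (fun acc c => acc ++ [(c.toNat : Int)]) []

-- one iteration of the rotation<0 loop: a = ord_en.pop(); ord_en.insert(0, a)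
-- (pop() on [] raises IndexError in Python; that input is excluded by Pre_solution)
def popBackInsert (l : List Int) : List Int :=
  match l.getLast? with
  | none => []
  | some a => a :: l.dropLast

-- one iteration of the rotation>=0 loop: a = ord_en.pop(0); ord_en.append(a)
def popFrontAppend (l : List Int) : List Int :=
  match l with
  | [] => []
  | a :: rest => rest ++ [a]

def solution (encrypted_text : String) (key : String) (rotation : Int) : String :=
  let ord_en := asciiA encrypted_text.toList
  let ord_en :=
    if rotation < 0 then
      (List.range rotation.natAbs).foldl (fun l _ => popBackInsert l) ord_en
    else
      (List.range rotation.toNat).foldl (fun l _ => popFrontAppend l) ord_en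
  let ord_key := asciiA key.toList
  let kk := ord_key.map (fun x => x - 96)
  let en := (ord_en.zip kk).map (fun p => p.1 - p.2)
  let en := en.map (fun x => if x > 96 then x else x + 123 - 97)
  -- ''.join(de_ascii(en)) : chr of each int
  String.mk (en.map (fun i => Char.ofNat i.toNat))

-- ===== PORT B =====
def solution_alt (encrypted_text : String) (key : String) (rotation : Int) : String :=
  let s := encrypted_text.toList
  let ks := key.toList
  let n : Int := (s.length : Int)
  String.mk ((List.range (min s.length ks.length)).map (fun (i : Nat) =>
    let src : Int := ((s.getD (PySem.Int.mod ((i : Int) + rotation) n).toNat ' ').toNat : Int)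
                     - (((ks.getD i ' ').toNat : Int) - 96)
    let src := if src ≤ 96 then src + 26 else src
    Char.ofNat src.toNat))

-- ===== PRECONDITION & SPEC =====
-- Pre_ excludes only empty encrypted_text with rotation ≠ 0, where A's pop raises IndexError.
def Pre_solution (encrypted_text : String) (key : String) (rotation : Int) : Prop :=
  encrypted_text = "" → rotation = 0
instance (encrypted_text : String) (key : String) (rotation : Int) : Decidable (Pre_solution encrypted_text key rotation) := by unfold Pre_solution; infer_instance

def pvWitness_solution : String × String × Int := ("abcxyz", "key", 2)

def Spec_solution (encrypted_text : String) (key : String) (rotation : Int) (out : String) : Prop := out = solution_alt encrypted_text key rotation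
instance (encrypted_text : String) (key : String) (rotation : Int) (out : String) : Decidable (Spec_solution encrypted_text key rotation out) := by unfold Spec_solution; infer_instance

-- ===== CLAIM (what is proved, stated in full; the proofs are below) =====
def Claim_equal_solution : Prop := ∀ (encrypted_text : String) (key : String) (rotation : Int), Dom_solution encrypted_text key rotation → Pre_solution encrypted_text key rotation → Spec_solution encrypted_text key rotation (solution encrypted_text key rotation)


-- ===== LEMMAS AND PROOFS =====

theorem asciiA_eq_map : ∀ (l : List Char), asciiA l = l.map (fun c => (c.toNat : Int)) := by
  have h : ∀ (l : List Char) (acc : List Int),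
      l.foldl (fun a c => a ++ [(c.toNat : Int)]) acc = acc ++ l.map (fun c => (c.toNat : Int)) := by
    intro l
    induction l with
    | nil => simp
    | cons c t ih => intro acc; simp [ih]
  intro l; rw [asciiA, h l, List.nil_append]

theorem popFrontAppend_rotate (l : List Int) : popFrontAppend l = l.rotate 1 := by
  cases l with
  | nil => simp [popFrontAppend]
  | cons a rest =>
      show rest ++ [a] = (a :: rest).rotate (0 + 1)
      rw [List.rotate_cons_succ, List.rotate_zero]

theorem popBackInsert_rotate (l : List Int) (h : l ≠ []) :
    popBackInsert l = l.rotate (l.length - 1) := by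
  have hd : l.dropLast ++ [l.getLast h] = l := List.dropLast_append_getLast h
  have hlen : l.length - 1 = l.dropLast.length := by simp [List.length_dropLast]
  have hget : l.getLast? = some (l.getLast h) := List.getLast?_eq_getLast h
  calc popBackInsert l = l.getLast h :: l.dropLast := by
        simp [popBackInsert, hget]
    _ = (l.dropLast ++ [l.getLast h]).rotate l.dropLast.length := by
        rw [List.rotate_eq_drop_append_take (by simp)]
        simp
    _ = l.rotate (l.length - 1) := by rw [hd, hlen]

theorem iter_fwd (k : Nat) (l : List Int) :
    (List.range k).foldl (fun a _ => popFrontAppend a) l = l.rotate k := by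
  induction k with
  | zero => simp
  | succ k ih =>
      rw [List.range_succ, List.foldl_append]
      simp only [List.foldl_cons, List.foldl_nil]
      rw [ih, popFrontAppend_rotate, List.rotate_rotate]

theorem iter_bwd (k : Nat) (l : List Int) (h : l ≠ []) :
    (List.range k).foldl (fun a _ => popBackInsert a) l = l.rotate ((l.length - 1) * k) := by
  induction k with
  | zero => simp
  | succ k ih =>
      rw [List.range_succ, List.foldl_append]
      have hne : l.rotate ((l.length - 1) * k) ≠ [] := by
        intro hc
        exact h (by simpa using congrArg List.length hc)
      simp only [List.foldl_cons, List.foldl_nil]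
      rw [ih, popBackInsert_rotate _ hne, List.length_rotate, List.rotate_rotate]
      ring_nf

-- the index arithmetic: A's effective Nat rotation K agrees with B's floor-mod index
theorem idx_eq (i n : Nat) (r : Int) (K : Nat) (hn : 0 < n)
    (hK : ((K : Int)) % (n : Int) = r % (n : Int)) :
    (i + K) % n = ((PySem.Int.mod ((i : Int) + r) (n : Int)).toNat) := by
  have hpos : (0 : Int) < (n : Int) := by exact_mod_cast hn
  rw [PySem.Int.mod_eq_emod_of_pos hpos]
  have h1 : (((i + K : Nat) : Int)) % (n : Int) = ((i : Int) + r) % (n : Int) := by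
    have := Int.ModEq.add_left (i : Int) (a := (K : Int)) (b := r) (n := (n : Int)) hK
    simpa [Int.ModEq, Int.natCast_add] using this
  have h2 : (((i + K) % n : Nat) : Int) = ((i : Int) + r) % (n : Int) := by
    rw [← h1]; push_cast; ring_nf
  omega

theorem solution_spec : Claim_equal_solution := by
  intro t k r _ hpre
  unfold Spec_solution
  simp only [solution, solution_alt]
  by_cases hemp : t = ""
  · subst hemp
    have hr0 : r = 0 := hpre rfl
    subst hr0
    simp [asciiA_eq_map]
  · -- nonempty text
    have hsne : t.toList ≠ [] := fun hc => hemp (String.toList_eq_nil_iff.mp hc)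
    set s := t.toList with hs
    set ks := k.toList with hks
    have hn : 0 < s.length := List.length_pos_iff.mpr hsne
    -- A's rotated list is a rotate of the mapped list, by an amount congruent to r mod n
    obtain ⟨K, hrot, hK⟩ :
        ∃ K : Nat,
          (if r < 0 then
            (List.range r.natAbs).foldl (fun l _ => popBackInsert l) (asciiA s)
          else
            (List.range r.toNat).foldl (fun l _ => popFrontAppend l) (asciiA s)) =
            (s.map (fun c => (c.toNat : Int))).rotate K ∧
          ((K : Int)) % (s.length : Int) = r % (s.length : Int) := by
      have hmaplen : (s.map (fun c => (c.toNat : Int))).length = s.length := by simp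
      have hmapne : s.map (fun c => (c.toNat : Int)) ≠ [] := by
        simpa [List.map_eq_nil_iff] using hsne
      by_cases hneg : r < 0
      · refine ⟨(s.length - 1) * r.natAbs, ?_, ?_⟩
        · rw [if_pos hneg, asciiA_eq_map, iter_bwd _ _ hmapne, hmaplen]
        · -- (n-1)*|r| ≡ r  (mod n)  when r < 0
          have hdvd : ((s.length : Int)) ∣ ((((s.length - 1) * r.natAbs : Nat) : Int) - r) := by
            refine ⟨r.natAbs, ?_⟩
            have hr : r = -(r.natAbs : Int) := by omega
            have h1 : (((s.length - 1) * r.natAbs : Nat) : Int)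
                = ((s.length : Int) - 1) * (r.natAbs : Int) := by
              rw [Int.natCast_mul]
              congr 1
              omega
            rw [h1]; linear_combination -hr
          exact ((Int.modEq_iff_dvd.mpr hdvd).symm : Int.ModEq _ _ _)
      · refine ⟨r.toNat, ?_, ?_⟩
        · rw [if_neg hneg, asciiA_eq_map, iter_fwd]
        · congr 1; omega
    rw [hrot]
    -- now compare the two character lists elementwise
    congr 1
    apply List.ext_getElem
    · simp [asciiA_eq_map]
    · intro i h1 h2
      simp only [List.getElem_map, List.getElem_zip, List.getElem_range, asciiA_eq_map]
      have hm : i < min s.length ks.length := by simpa using h2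
      have hi_s : (i + K) % s.length < s.length := Nat.mod_lt _ hn
      have hidx : (i + K) % s.length = ((PySem.Int.mod ((i : Int) + r) (s.length : Int)).toNat) := by
        exact idx_eq i s.length r K hn hK
      have hrotget :
          ((s.map (fun c => (c.toNat : Int))).rotate K)[i]'(by simpa [List.length_rotate] using (by omega : i < s.length)) =
            ((s[(i + K) % s.length]'hi_s).toNat : Int) := by
        rw [List.getElem_rotate]
        simp
      rw [hrotget]
      have hgd : s.getD ((PySem.Int.mod ((i : Int) + r) (s.length : Int)).toNat) ' ' =
          s[(i + K) % s.length]'hi_s := by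
        rw [← hidx]
        exact List.getD_eq_getElem s ' ' hi_s
      have hgk : ks.getD i ' ' = ks[i]'(by omega) := List.getD_eq_getElem ks ' ' (by omega)
      rw [hgd, hgk]
      -- same integer, same branch shape
      set x : Int := ((s[(i + K) % s.length]'hi_s).toNat : Int) - (((ks[i]'(by omega)).toNat : Int) - 96) with hx
      have : (if x > 96 then x else x + 123 - 97) = (if x ≤ 96 then x + 26 else x) := by
        split_ifs <;> omega
      simp only [hx] at this ⊢
      rw [this]

-- ===== VERDICT (by name: the statement is the Claim_ definition above) =====
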